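-- pv_equiv track=rewrite | github.com/HaoranShivs/infraredDimTargetDetection | net/utils.py | hide_channels
-- ===== SOURCE A (Python) =====
-- def hide_channels(out_channel:int, num:int):
--     res = []
--     i = 2
--     for j in range(num):
--         hide_channel = int(out_channel/i)
--         i = i * 2
--         if hide_channel > 1:
--             res.insert(0,hide_channel)
--         else:
--             res.append(out_channel)
--     return res
-- ===== SOURCE B (Python) =====
-- def hide_channels(out_channel: int, num: int):
--     vals = []
--     d = 2
--     for _ in range(num):
--         vals.append(int(out_channel / d))
--         d *= 2
--     front = [v for v in vals if v > 1]
--     back = [out_channel for v in vals if v <= 1]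
--     return front[::-1] + back
-- ===== Notes on version B (the rewrite author's own statement) =====
-- stated objective: simpler
-- what changed: Replaces A's stateful loop with conditional insert(0)/append by building the quotient list first (doubling denominator), then partitioning it into the >1 values and the out_channel fills and returning the reversed front plus the back.
import Mathlib
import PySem

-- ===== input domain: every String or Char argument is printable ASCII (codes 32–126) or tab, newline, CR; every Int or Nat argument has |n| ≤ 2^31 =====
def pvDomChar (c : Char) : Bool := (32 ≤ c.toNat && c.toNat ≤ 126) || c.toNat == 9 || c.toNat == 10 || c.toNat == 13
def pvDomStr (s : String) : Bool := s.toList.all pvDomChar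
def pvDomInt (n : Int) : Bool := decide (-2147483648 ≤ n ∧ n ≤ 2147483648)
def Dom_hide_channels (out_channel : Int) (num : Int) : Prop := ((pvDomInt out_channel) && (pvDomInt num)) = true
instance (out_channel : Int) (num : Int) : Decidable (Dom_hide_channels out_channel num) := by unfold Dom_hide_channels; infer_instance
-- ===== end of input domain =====

-- B replaces A's stateful prepend/append loop by a one-pass value list, a partition into
-- the >1 values and the out_channel fills, and a reversal of the front part only (simpler).

-- ===== PORT A =====
-- int(out_channel/i): float true division by a power of two then int-truncation; for
-- |out_channel| ≤ 2^31 this is exact truncation toward zero, i.e. Int.tdiv (bit-exact here).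
def hide_channels (out_channel : Int) (num : Int) : List Int :=
  ((PySem.List.pyRange 0 num 1).foldl
    (fun (st : List Int × Int) _j =>
      let hide_channel := Int.tdiv out_channel st.2
      let i := st.2 * 2
      if hide_channel > 1 then (hide_channel :: st.1, i) else (st.1 ++ [out_channel], i))
    ([], 2)).1

-- ===== PORT B =====
-- int(out_channel/d) is the same exact truncating division, Int.tdiv (see above).
def hide_channels_alt (out_channel : Int) (num : Int) : List Int :=
  let vals := ((PySem.List.pyRange 0 num 1).foldl
    (fun (st : List Int × Int) _j =>
      (st.1 ++ [Int.tdiv out_channel st.2], st.2 * 2))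
    ([], 2)).1
  let front := vals.filter (fun v => decide (v > 1))
  let back := (vals.filter (fun v => decide (v ≤ 1))).map (fun _ => out_channel)
  front.reverse ++ back

-- ===== PRECONDITION & SPEC =====
def Spec_hide_channels (out_channel : Int) (num : Int) (out : List Int) : Prop := out = hide_channels_alt out_channel num
instance (out_channel : Int) (num : Int) (out : List Int) : Decidable (Spec_hide_channels out_channel num out) := by unfold Spec_hide_channels; infer_instance

-- ===== CLAIM =====
def Claim_equal_hide_channels : Prop := ∀ (out_channel : Int) (num : Int), Dom_hide_channels out_channel num → Spec_hide_channels out_channel num (hide_channels out_channel num)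

-- ===== LEMMAS AND PROOFS =====

-- invariant for A's loop: accumulator = B's (front.reverse ++ back), counter = 2^(n+1)
theorem hide_channels_loop (oc : Int) (n : Nat) :
    ((PySem.List.pyRange 0 (n : Int) 1).foldl
      (fun (st : List Int × Int) _j =>
        let hide_channel := Int.tdiv oc st.2
        let i := st.2 * 2
        if hide_channel > 1 then (hide_channel :: st.1, i) else (st.1 ++ [oc], i))
      ([], 2))
    = ((((PySem.List.pyRange 0 (n : Int) 1).map
          (fun j => Int.tdiv oc ((2 : Int) ^ (j + 1).toNat))).filter
            (fun v => decide (v > 1))).reverse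
        ++ (((PySem.List.pyRange 0 (n : Int) 1).map
          (fun j => Int.tdiv oc ((2 : Int) ^ (j + 1).toNat))).filter
            (fun v => decide (v ≤ 1))).map (fun _ => oc),
       (2 : Int) ^ (n + 1)) := by
  induction n with
  | zero => simp
  | succ n ih =>
      have hcast : ((n + 1 : Nat) : Int) = (n : Int) + 1 := by push_cast; ring
      have hsplit : PySem.List.pyRange 0 ((n + 1 : Nat) : Int) 1
          = PySem.List.pyRange 0 (n : Int) 1 ++ [(n : Int)] := by
        rw [hcast, PySem.List.pyRange_one_succ_right (by positivity)]
      rw [hsplit]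
      simp only [List.foldl_append, List.map_append, List.filter_append, List.reverse_append,
        List.map_cons, List.map_nil, List.filter_cons, List.filter_nil, ih,
        List.foldl_cons, List.foldl_nil]
      have htn : (((n : Int) + 1).toNat) = n + 1 := by omega
      rw [htn]
      by_cases h : (1 : Int) < Int.tdiv oc ((2 : Int) ^ (n + 1))
      · simp only [pow_succ] at h ⊢
        simp [h, not_le.mpr h]
      · simp only [pow_succ] at h ⊢
        simp [h, not_lt.mp h, List.append_assoc]

-- invariant for B's value loop: vals = the truncated quotients, denominator = 2^(n+1)
theorem hide_channels_alt_loop (oc : Int) (n : Nat) :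
    ((PySem.List.pyRange 0 (n : Int) 1).foldl
      (fun (st : List Int × Int) _j =>
        (st.1 ++ [Int.tdiv oc st.2], st.2 * 2))
      ([], 2))
    = ((PySem.List.pyRange 0 (n : Int) 1).map
        (fun j => Int.tdiv oc ((2 : Int) ^ (j + 1).toNat)),
       (2 : Int) ^ (n + 1)) := by
  induction n with
  | zero => simp
  | succ n ih =>
      have hcast : ((n + 1 : Nat) : Int) = (n : Int) + 1 := by push_cast; ring
      have hsplit : PySem.List.pyRange 0 ((n + 1 : Nat) : Int) 1
          = PySem.List.pyRange 0 (n : Int) 1 ++ [(n : Int)] := by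
        rw [hcast, PySem.List.pyRange_one_succ_right (by positivity)]
      rw [hsplit]
      simp only [List.foldl_append, List.map_append, List.map_cons, List.map_nil, ih,
        List.foldl_cons, List.foldl_nil]
      have htn : (((n : Int) + 1).toNat) = n + 1 := by omega
      rw [htn]
      simp [pow_succ]

-- ===== VERDICT =====
theorem hide_channels_spec : Claim_equal_hide_channels := by
  intro oc num _
  simp only [Spec_hide_channels, hide_channels, hide_channels_alt]
  by_cases h : num ≤ 0
  · rw [PySem.List.pyRange_one_eq_nil h]
    simp
  · have h0 : num = ((num.toNat : Nat) : Int) := by omega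
    rw [h0, hide_channels_loop, hide_channels_alt_loop]
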